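-- pv_equiv track=rewrite | github.com/purdue-arc/sphero-swarm | algorithms/determine_bind.py | group_spheros
-- ===== SOURCE A (Python) =====
-- def group_spheros(bound_spheros):
--     '''
--     Processes list of pairs into list of list groups
--     '''
--     groups_of_spheros = []
--     groups_of_spheros.append(set(bound_spheros[0]))
--
--     for i in range(0, len(bound_spheros), 1):
--         found_group = False
--         for group_num in range(0, len(groups_of_spheros), 1):
--             if (len(groups_of_spheros[group_num].intersection(set(bound_spheros[i]))) != 0):
--                 for val in bound_spheros[i]:
--                     groups_of_spheros[group_num].add(val)
--                 found_group = True
--                 break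
--         if (not found_group):
--             groups_of_spheros.append(set(bound_spheros[i]))
--
--     return groups_of_spheros
-- ===== SOURCE B (Python) =====
-- def group_spheros(bound_spheros):
--     '''
--     Processes list of pairs into list of list groups
--     '''
--     groups = [set(bound_spheros[0])]
--     index = {v: {0} for v in bound_spheros[0]}
--
--     for pair in bound_spheros:
--         hits = set()
--         for v in pair:
--             hits |= index.get(v, set())
--         if hits:
--             g = min(hits)
--         else:
--             g = len(groups)
--             groups.append(set())
--         for v in pair:
--             groups[g].add(v)
--             index.setdefault(v, set()).add(g)
--     return groups
-- ===== Notes on version B (the rewrite author's own statement) =====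
-- stated objective: alternative
-- what changed: Replaced A's per-pair linear scan over all groups (a set intersection with each) by a value-to-group-indices dictionary: the target group is the minimum index obtained by direct lookup of the pair's values, and the dictionary is updated incrementally.
import Mathlib
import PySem

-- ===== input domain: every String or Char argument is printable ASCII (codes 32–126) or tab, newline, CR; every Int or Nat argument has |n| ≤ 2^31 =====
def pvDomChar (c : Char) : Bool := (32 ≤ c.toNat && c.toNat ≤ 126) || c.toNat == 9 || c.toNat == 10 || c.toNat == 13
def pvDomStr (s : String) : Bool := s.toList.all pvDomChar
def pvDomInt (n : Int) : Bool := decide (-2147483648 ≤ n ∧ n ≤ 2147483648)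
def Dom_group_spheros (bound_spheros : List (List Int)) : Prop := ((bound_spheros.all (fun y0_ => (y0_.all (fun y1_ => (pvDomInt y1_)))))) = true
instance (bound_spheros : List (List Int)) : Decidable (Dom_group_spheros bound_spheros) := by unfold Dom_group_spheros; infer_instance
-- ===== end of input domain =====

-- B replaces A's per-pair scan over all groups (a set intersection with each) by a value→group-indices
-- dictionary: the target group is the minimum index obtained by direct lookup of the pair's values,
-- and the dictionary is updated incrementally (objective: alternative).
-- The returned groups are Python sets: each inner list holds the distinct elements (compared as a set).

-- ===== PORT A =====
-- A's inner loop: 'for group_num in …: if intersection nonempty: add all vals; break'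
def pvFindAdd (groups : List (PySem.Set Int)) (pair : List Int) :
    List (PySem.Set Int) × Bool :=
  match groups with
  | [] => ([], false)
  | g :: rest =>
    if (PySem.Set.inter g (PySem.Set.ofList pair)).length ≠ 0 then
      (pair.foldl PySem.Set.add g :: rest, true)
    else
      let r := pvFindAdd rest pair
      (g :: r.1, r.2)

def group_spheros (bound_spheros : List (List Int)) : List (List Int) :=
  match bound_spheros with
  | [] => []    -- bound_spheros[0] raises IndexError in Python; excluded by Pre_
  | first :: _ =>
    bound_spheros.foldl
      (fun groups pair =>
        let r := pvFindAdd groups pair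
        if r.2 then r.1 else r.1 ++ [PySem.Set.ofList pair])
      [PySem.Set.ofList first]

-- ===== PORT B =====
-- one loop iteration of B: union of the index lookups of the pair's values, min hit index
-- (or a fresh group appended), then one pass over the pair adding each value to that group and
-- recording the group index for the value in the dictionary
-- (Python mutates the stored set in place via setdefault(v, set()).add(g); ported as insert of the grown set).
def pvBStep (st : List (PySem.Set Int) × PySem.Dict Int (List Nat)) (pair : List Int) :
    List (PySem.Set Int) × PySem.Dict Int (List Nat) :=
  let hits : PySem.Set Nat :=
    pair.foldl (fun h v => PySem.Set.union h (st.2.getD v [])) []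
  let gi : Nat :=
    if !hits.isEmpty then (PySem.List.min? hits (fun x => x)).getD 0 else st.1.length
  let groups1 : List (PySem.Set Int) :=
    if !hits.isEmpty then st.1 else st.1 ++ [PySem.Set.empty]
  pair.foldl
    (fun st2 v =>
      (st2.1.set gi (PySem.Set.add (st2.1.getD gi []) v),
       st2.2.insert v (PySem.Set.add (st2.2.getD v []) gi)))
    (groups1, st.2)

def group_spheros_alt (bound_spheros : List (List Int)) : List (List Int) :=
  match bound_spheros with
  | [] => []    -- bound_spheros[0] raises IndexError in Python; excluded by Pre_
  | first :: _ =>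
    (bound_spheros.foldl pvBStep
      ([PySem.Set.ofList first],
       first.foldl (fun d v => d.insert v [0]) PySem.Dict.empty)).1

-- ===== PRECONDITION & SPEC =====
-- Pre_ excludes only the empty list, on which A (and B alike) raise IndexError at bound_spheros[0].
def Pre_group_spheros (bound_spheros : List (List Int)) : Prop := bound_spheros ≠ []
instance (bound_spheros : List (List Int)) : Decidable (Pre_group_spheros bound_spheros) := by
  unfold Pre_group_spheros; infer_instance

def pvWitness_group_spheros : List (List Int) := [[1, 2], [3, 4], [2, 3]]

def Spec_group_spheros (bound_spheros : List (List Int)) (out : List (List Int)) : Prop :=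
  out = group_spheros_alt bound_spheros
instance (bound_spheros : List (List Int)) (out : List (List Int)) :
    Decidable (Spec_group_spheros bound_spheros out) := by
  unfold Spec_group_spheros; infer_instance

-- ===== CLAIM (what is proved, stated in full; the proofs are below) =====
def Claim_equal_group_spheros : Prop :=
  ∀ (bound_spheros : List (List Int)), Dom_group_spheros bound_spheros →
    Pre_group_spheros bound_spheros →
      Spec_group_spheros bound_spheros (group_spheros bound_spheros)

-- ===== LEMMAS AND PROOFS =====

-- 'group g intersects pair'
def pvHitB (g : PySem.Set Int) (pair : List Int) : Bool :=
  pair.any (fun v => PySem.Set.contains g v)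

theorem pvHitB_iff (g : PySem.Set Int) (pair : List Int) :
    pvHitB g pair = true ↔ ∃ v ∈ pair, v ∈ g := by
  simp [pvHitB, List.any_eq_true]

theorem pvGuard_iff (g : PySem.Set Int) (pair : List Int) :
    ((PySem.Set.inter g (PySem.Set.ofList pair)).length ≠ 0) ↔ pvHitB g pair = true := by
  rw [pvHitB_iff, Ne, List.length_eq_zero_iff]
  constructor
  · intro h
    rcases List.exists_mem_of_ne_nil (PySem.Set.inter g (PySem.Set.ofList pair)) h with ⟨x, hx⟩
    rw [PySem.Set.mem_inter] at hx
    exact ⟨x, (PySem.Set.mem_ofList _ _).mp hx.2, hx.1⟩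
  · rintro ⟨v, hv, hvg⟩ hnil
    have hmem : v ∈ PySem.Set.inter g (PySem.Set.ofList pair) :=
      (PySem.Set.mem_inter _ _ _).mpr ⟨hvg, (PySem.Set.mem_ofList _ _).mpr hv⟩
    rw [hnil] at hmem
    exact List.not_mem_nil hmem

-- getD at a valid index
theorem pvGetD (l : List (PySem.Set Int)) (j : Nat) (h : j < l.length) : l.getD j [] = l[j] := by
  simp [List.getD_eq_getElem?_getD, List.getElem?_eq_getElem h]

-- A's inner scan when no group intersects: groups unchanged, found = false
theorem pvFindAdd_none (groups : List (PySem.Set Int)) (pair : List Int)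
    (h : ∀ g ∈ groups, pvHitB g pair = false) :
    pvFindAdd groups pair = (groups, false) := by
  induction groups with
  | nil => rfl
  | cons g rest ih =>
    have hg : pvHitB g pair = false := h g (by simp)
    have hguard : ¬ ((PySem.Set.inter g (PySem.Set.ofList pair)).length ≠ 0) := by
      rw [pvGuard_iff, hg]; simp
    simp only [pvFindAdd]
    rw [if_neg hguard, ih (fun g' hg' => h g' (by simp [hg']))]

-- A's inner scan when i is the first intersecting index
theorem pvFindAdd_found (pair : List Int) :
    ∀ (groups : List (PySem.Set Int)) (i : Nat), i < groups.length →
    pvHitB (groups.getD i []) pair = true →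
    (∀ j < i, pvHitB (groups.getD j []) pair = false) →
    pvFindAdd groups pair =
      (groups.set i (pair.foldl PySem.Set.add (groups.getD i [])), true) := by
  intro groups
  induction groups with
  | nil => intro i hi; simp at hi
  | cons g rest ih =>
    intro i hi hhit hfirst
    cases i with
    | zero =>
      have hguard : (PySem.Set.inter g (PySem.Set.ofList pair)).length ≠ 0 := by
        rw [pvGuard_iff]; simpa using hhit
      simp only [pvFindAdd]
      rw [if_pos hguard]
      simp
    | succ n =>
      have hg0 : pvHitB g pair = false := by simpa using hfirst 0 (Nat.succ_pos n)
      have hguard : ¬ ((PySem.Set.inter g (PySem.Set.ofList pair)).length ≠ 0) := by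
        rw [pvGuard_iff, hg0]; simp
      have hrec := ih n (by simpa using hi) (by simpa using hhit)
        (fun j hj => by simpa using hfirst (j + 1) (by omega))
      simp only [pvFindAdd]
      rw [if_neg hguard, hrec]
      simp

-- membership in B's union-of-lookups fold
theorem pvMem_hits (pair : List Int) (f : Int → List Nat) (g : Nat) :
    ∀ init : PySem.Set Nat,
      g ∈ pair.foldl (fun h v => PySem.Set.union h (f v)) init ↔
        g ∈ init ∨ ∃ v ∈ pair, g ∈ f v := by
  induction pair with
  | nil => simp
  | cons x rest ih =>
    intro init
    simp only [List.foldl_cons, ih, PySem.Set.mem_union]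
    constructor
    · rintro (⟨h | h⟩ | ⟨v, hv, hgv⟩)
      · exact Or.inl h
      · exact Or.inr ⟨x, by simp, h⟩
      · exact Or.inr ⟨v, by simp [hv], hgv⟩
    · rintro (h | ⟨v, hv, hgv⟩)
      · exact Or.inl (Or.inl h)
      · rcases List.mem_cons.mp hv with rfl | hv'
        · exact Or.inl (Or.inr hgv)
        · exact Or.inr ⟨v, hv', hgv⟩

-- B's per-pair fold, groups component: repeated set-at-gi is one update of group gi
theorem pvFold_groups (pair : List Int) (gi : Nat) :
    ∀ (groups : List (PySem.Set Int)), gi < groups.length →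
      pair.foldl (fun gs v => gs.set gi (PySem.Set.add (gs.getD gi []) v)) groups =
        groups.set gi (pair.foldl PySem.Set.add (groups.getD gi [])) := by
  induction pair with
  | nil =>
    intro groups h
    simp only [List.foldl_nil]
    rw [pvGetD _ _ h, List.set_getElem_self]
  | cons x rest ih =>
    intro groups hgi
    have hgetD : (groups.set gi (PySem.Set.add (groups.getD gi []) x)).getD gi [] =
        PySem.Set.add (groups.getD gi []) x := by
      rw [pvGetD _ _ (by simpa using hgi)]
      simp [List.getElem_set_self, hgi]
    simp only [List.foldl_cons]
    rw [ih _ (by simpa using hgi), hgetD, List.set_set]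

-- B's per-pair fold, dictionary component: lookup after the loop
theorem pvFold_idx (gi : Nat) (v : Int) (pair : List Int) :
    ∀ idx : PySem.Dict Int (List Nat),
      (pair.foldl (fun d u => d.insert u (PySem.Set.add (d.getD u []) gi)) idx).getD v [] =
        if v ∈ pair then PySem.Set.add (idx.getD v []) gi else idx.getD v [] := by
  induction pair with
  | nil => simp
  | cons x rest ih =>
    intro idx
    simp only [List.foldl_cons, ih]
    by_cases hvx : v = x
    · subst hvx
      by_cases hvr : v ∈ rest
      · simp [hvr, PySem.Dict.getD_insert_self]
      · simp [hvr, PySem.Dict.getD_insert_self]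
    · have hkey := PySem.Dict.getD_insert_of_ne idx
        (PySem.Set.add (idx.getD x []) gi) ([] : List Nat) (fun h => hvx h)
      by_cases hvr : v ∈ rest <;> simp [hvr, hvx, hkey]

-- the invariant tying B's dictionary to the common groups list
def pvInv (groups : List (PySem.Set Int)) (idx : PySem.Dict Int (List Nat)) : Prop :=
  ∀ (v : Int) (g : Nat), g ∈ idx.getD v [] ↔ (g < groups.length ∧ v ∈ groups.getD g [])

-- A's one loop iteration (the body of group_spheros' fold)
def pvAStep (groups : List (PySem.Set Int)) (pair : List Int) : List (PySem.Set Int) :=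
  let r := pvFindAdd groups pair
  if r.2 then r.1 else r.1 ++ [PySem.Set.ofList pair]

-- the heart: one step of B equals one step of A, and the invariant is preserved
theorem pvStep (groups : List (PySem.Set Int)) (idx : PySem.Dict Int (List Nat))
    (pair : List Int) (hInv : pvInv groups idx) :
    (pvBStep (groups, idx) pair).1 = pvAStep groups pair ∧
      pvInv (pvAStep groups pair) (pvBStep (groups, idx) pair).2 := by
  have hchar : ∀ g : Nat,
      g ∈ pair.foldl (fun h v => PySem.Set.union h (idx.getD v [])) [] ↔
        g < groups.length ∧ pvHitB (groups.getD g []) pair = true := by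
    intro g
    rw [pvMem_hits]
    constructor
    · rintro (h | ⟨v, hv, hgv⟩)
      · exact absurd h (List.not_mem_nil)
      · rcases (hInv v g).mp hgv with ⟨hlen, hmem⟩
        exact ⟨hlen, (pvHitB_iff _ _).mpr ⟨v, hv, hmem⟩⟩
    · rintro ⟨hlen, hhit⟩
      rcases (pvHitB_iff _ _).mp hhit with ⟨v, hv, hmem⟩
      exact Or.inr ⟨v, hv, (hInv v g).mpr ⟨hlen, hmem⟩⟩
  by_cases hemp : pair.foldl (fun h v => PySem.Set.union h (idx.getD v [])) [] = []
  · -- no group intersects: A appends a fresh group, B appends a fresh group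
    have hnoneP : ∀ g ∈ groups, pvHitB g pair = false := by
      intro g hg
      cases hb : pvHitB g pair with
      | false => rfl
      | true =>
        rcases List.mem_iff_getElem.mp hg with ⟨j, hj, rfl⟩
        have hjh : j ∈ pair.foldl (fun h v => PySem.Set.union h (idx.getD v [])) [] :=
          (hchar j).mpr ⟨hj, by rw [pvGetD _ _ hj]; exact hb⟩
        rw [hemp] at hjh
        exact absurd hjh (List.not_mem_nil)
    have hA : pvAStep groups pair = groups ++ [PySem.Set.ofList pair] := by
      simp [pvAStep, pvFindAdd_none groups pair hnoneP]
    have hBsplit : pvBStep (groups, idx) pair =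
        (pair.foldl (fun gs v =>
            gs.set groups.length (PySem.Set.add (gs.getD groups.length []) v))
          (groups ++ [PySem.Set.empty]),
         pair.foldl (fun d v =>
            d.insert v (PySem.Set.add (d.getD v []) groups.length)) idx) := by
      simp only [pvBStep, hemp, List.isEmpty_nil, Bool.not_true, Bool.false_eq_true, if_false]
      rw [PySem.List.foldl_prod_mk
        (f := fun (gs : List (PySem.Set Int)) (v : Int) =>
          gs.set groups.length (PySem.Set.add (gs.getD groups.length []) v))
        (g := fun (d : PySem.Dict Int (List Nat)) (v : Int) =>
          d.insert v (PySem.Set.add (d.getD v []) groups.length))]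
    have hlenlt : groups.length < (groups ++ [PySem.Set.empty]).length := by simp
    have hBgroups : (pvBStep (groups, idx) pair).1 = groups ++ [PySem.Set.ofList pair] := by
      rw [hBsplit]
      simp only
      rw [pvFold_groups pair groups.length _ hlenlt, pvGetD _ _ hlenlt]
      rw [List.getElem_append_right (by omega)]
      simp only [Nat.sub_self, List.getElem_singleton]
      rw [show (PySem.Set.empty : PySem.Set Int) = [] from rfl, ← PySem.Set.ofList_eq_foldl]
      rw [List.set_append_right _ _ (Nat.le_refl _)]
      simp
    refine ⟨by rw [hBgroups, hA], ?_⟩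
    rw [hA, hBsplit]
    intro v g
    simp only
    rw [pvFold_idx]
    by_cases hvp : v ∈ pair
    · rw [if_pos hvp, PySem.Set.mem_add, hInv v g]
      constructor
      · rintro (⟨hl, hm⟩ | rfl)
        · refine ⟨by simp; omega, ?_⟩
          rw [pvGetD _ _ (by simp; omega), List.getElem_append_left hl, ← pvGetD _ _ hl]
          exact hm
        · refine ⟨by simp, ?_⟩
          rw [pvGetD _ _ (by simp), List.getElem_append_right (Nat.le_refl _)]
          simp [PySem.Set.mem_ofList, hvp]
      · rintro ⟨hl, hm⟩
        by_cases hg : g < groups.length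
        · left
          refine ⟨hg, ?_⟩
          rw [pvGetD _ _ hg]
          rw [pvGetD _ _ (by simp; omega), List.getElem_append_left hg] at hm
          exact hm
        · right
          simp at hl
          omega
    · rw [if_neg hvp, hInv v g]
      constructor
      · rintro ⟨hl, hm⟩
        refine ⟨by simp; omega, ?_⟩
        rw [pvGetD _ _ (by simp; omega), List.getElem_append_left hl, ← pvGetD _ _ hl]
        exact hm
      · rintro ⟨hl, hm⟩
        by_cases hg : g < groups.length
        · refine ⟨hg, ?_⟩
          rw [pvGetD _ _ hg]
          rw [pvGetD _ _ (by simp; omega), List.getElem_append_left hg] at hm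
          exact hm
        · exfalso
          simp at hl
          have hgeq : g = groups.length := by omega
          subst hgeq
          rw [pvGetD _ _ (by simp), List.getElem_append_right (Nat.le_refl _)] at hm
          simp [PySem.Set.mem_ofList] at hm
          exact hvp ((PySem.Set.mem_ofList _ _).mp (by simpa using hm))
  · -- some group intersects: both update the first (minimum-index) intersecting group
    obtain ⟨m, hmin⟩ : ∃ m, PySem.List.min?
        (pair.foldl (fun h v => PySem.Set.union h (idx.getD v [])) []) (fun x => x) = some m := by
      cases h : PySem.List.min?
          (pair.foldl (fun h v => PySem.Set.union h (idx.getD v [])) []) (fun x => x) with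
      | none => exact absurd ((PySem.List.min?_eq_none_iff _ _).mp h) hemp
      | some m => exact ⟨m, rfl⟩
    have hm := (hchar m).mp (PySem.List.min?_mem hmin)
    have hmin' := PySem.List.min?_isMin hmin
    have hfirst : ∀ j < m, pvHitB (groups.getD j []) pair = false := by
      intro j hj
      cases hb : pvHitB (groups.getD j []) pair with
      | false => rfl
      | true =>
        have hjh := (hchar j).mpr ⟨Nat.lt_trans hj hm.1, hb⟩
        have := hmin' j hjh
        omega
    have hA : pvAStep groups pair =
        groups.set m (pair.foldl PySem.Set.add (groups.getD m [])) := by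
      simp [pvAStep, pvFindAdd_found pair groups m hm.1 hm.2 hfirst]
    have hne : ((pair.foldl (fun h v => PySem.Set.union h (idx.getD v [])) []).isEmpty) = false := by
      simpa [List.isEmpty_iff] using hemp
    have hBsplit : pvBStep (groups, idx) pair =
        (pair.foldl (fun gs v => gs.set m (PySem.Set.add (gs.getD m []) v)) groups,
         pair.foldl (fun d v => d.insert v (PySem.Set.add (d.getD v []) m)) idx) := by
      simp only [pvBStep, hne, hmin, Bool.not_false, if_true, Option.getD_some]
      rw [PySem.List.foldl_prod_mk
        (f := fun (gs : List (PySem.Set Int)) (v : Int) =>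
          gs.set m (PySem.Set.add (gs.getD m []) v))
        (g := fun (d : PySem.Dict Int (List Nat)) (v : Int) =>
          d.insert v (PySem.Set.add (d.getD v []) m))]
    have hBgroups : (pvBStep (groups, idx) pair).1 =
        groups.set m (pair.foldl PySem.Set.add (groups.getD m [])) := by
      rw [hBsplit]
      simp only
      rw [pvFold_groups pair m _ hm.1]
    refine ⟨by rw [hBgroups, hA], ?_⟩
    rw [hA, hBsplit]
    intro v g
    simp only
    rw [pvFold_idx]
    have hlen : (groups.set m (pair.foldl PySem.Set.add (groups.getD m []))).length
        = groups.length := by simp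
    have hgetset : ∀ g : Nat, g < groups.length →
        (groups.set m (pair.foldl PySem.Set.add (groups.getD m []))).getD g []
          = if g = m then pair.foldl PySem.Set.add (groups.getD m []) else groups.getD g [] := by
      intro g hg
      rw [pvGetD _ _ (by simpa using hg)]
      by_cases hgm : g = m
      · subst hgm
        simp [List.getElem_set_self, hg]
      · rw [List.getElem_set_ne (by omega), ← pvGetD _ _ hg]
        simp [hgm]
    have hmemfold : ∀ s : PySem.Set Int,
        v ∈ pair.foldl PySem.Set.add s ↔ v ∈ s ∨ v ∈ pair := by
      intro s
      rw [show pair.foldl PySem.Set.add s = PySem.Set.update s pair from rfl,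
        PySem.Set.mem_update]
    by_cases hvp : v ∈ pair
    · rw [if_pos hvp, PySem.Set.mem_add, hInv v g]
      constructor
      · rintro (⟨hl, hmm⟩ | hgm)
        · refine ⟨by omega, ?_⟩
          rw [hgetset g hl]
          by_cases hgm : g = m
          · subst hgm
            rw [if_pos rfl, hmemfold]
            exact Or.inl hmm
          · rw [if_neg hgm]; exact hmm
        · have hglt : g < groups.length := by omega
          refine ⟨by omega, ?_⟩
          rw [hgm, hgetset m hm.1, if_pos rfl, hmemfold]
          exact Or.inr hvp
      · rintro ⟨hl, hmm⟩
        rw [hlen] at hl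
        rw [hgetset g hl] at hmm
        by_cases hgm : g = m
        · exact Or.inr hgm
        · rw [if_neg hgm] at hmm
          exact Or.inl ⟨hl, hmm⟩
    · rw [if_neg hvp, hInv v g]
      constructor
      · rintro ⟨hl, hmm⟩
        refine ⟨by omega, ?_⟩
        rw [hgetset g hl]
        by_cases hgm : g = m
        · subst hgm
          rw [if_pos rfl, hmemfold]
          exact Or.inl hmm
        · rw [if_neg hgm]; exact hmm
      · rintro ⟨hl, hmm⟩
        rw [hlen] at hl
        rw [hgetset g hl] at hmm
        refine ⟨hl, ?_⟩
        by_cases hgm : g = m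
        · subst hgm
          rw [if_pos rfl, hmemfold] at hmm
          rcases hmm with h | h
          · exact h
          · exact absurd h hvp
        · rw [if_neg hgm] at hmm
          exact hmm

-- lookup in B's initial dictionary {v: {0} for v in first}
theorem pvInit_getD (first : List Int) (v : Int) :
    ∀ d : PySem.Dict Int (List Nat),
      (first.foldl (fun d u => d.insert u [0]) d).getD v [] =
        if v ∈ first then [0] else d.getD v [] := by
  induction first with
  | nil => simp
  | cons x rest ih =>
    intro d
    simp only [List.foldl_cons, ih]
    by_cases hvx : v = x
    · subst hvx
      by_cases hvr : v ∈ rest <;> simp [hvr, PySem.Dict.getD_insert_self]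
    · have hkey := PySem.Dict.getD_insert_of_ne d ([0] : List Nat) ([] : List Nat)
        (fun h => hvx h)
      by_cases hvr : v ∈ rest <;> simp [hvr, hvx, hkey]

theorem pvInit_inv (first : List Int) :
    pvInv [PySem.Set.ofList first]
      (first.foldl (fun d v => d.insert v [0]) PySem.Dict.empty) := by
  intro v g
  rw [pvInit_getD]
  by_cases hv : v ∈ first
  · rw [if_pos hv]
    constructor
    · intro hg
      simp at hg
      subst hg
      exact ⟨by simp, by simpa [PySem.Set.mem_ofList] using hv⟩
    · rintro ⟨hl, _⟩
      simp at hl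
      simp [hl]
  · rw [if_neg hv]
    constructor
    · intro hg
      rw [show (PySem.Dict.empty : PySem.Dict Int (List Nat)).getD v [] = [] from rfl] at hg
      exact absurd hg (List.not_mem_nil)
    · rintro ⟨hl, hm⟩
      exfalso
      simp at hl
      subst hl
      simp only [List.getD_cons_zero] at hm
      exact hv ((PySem.Set.mem_ofList _ _).mp hm)

-- the whole loop: B's fold tracks A's fold whenever the invariant holds
theorem pvLoop (l : List (List Int)) :
    ∀ (groups : List (PySem.Set Int)) (idx : PySem.Dict Int (List Nat)), pvInv groups idx →
      (l.foldl pvBStep (groups, idx)).1 = l.foldl pvAStep groups := by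
  induction l with
  | nil => intro groups idx _; rfl
  | cons x rest ih =>
    intro groups idx hInv
    have h := pvStep groups idx x hInv
    simp only [List.foldl_cons]
    rcases hB : pvBStep (groups, idx) x with ⟨G, D⟩
    rw [hB] at h
    simp only at h
    rw [h.1]
    exact ih _ _ h.2

-- ===== VERDICT (by name: the statement is the Claim_ definition above) =====
theorem group_spheros_spec : Claim_equal_group_spheros := by
  intro bs _ hpre
  unfold Spec_group_spheros
  cases bs with
  | nil => exact absurd rfl hpre
  | cons first rest =>
    show group_spheros (first :: rest) = group_spheros_alt (first :: rest)
    have hA : group_spheros (first :: rest)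
        = (first :: rest).foldl pvAStep [PySem.Set.ofList first] := rfl
    have hB : group_spheros_alt (first :: rest)
        = ((first :: rest).foldl pvBStep
            ([PySem.Set.ofList first],
             first.foldl (fun d v => d.insert v [0]) PySem.Dict.empty)).1 := rfl
    rw [hA, hB, pvLoop _ _ _ (pvInit_inv first)]
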